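-- pv_equiv track=rewrite | github.com/LLNL/CRPCA | vaccine_advance_core/featurization/tally_features.py | generic_dict_based_tally_reversible
-- ===== SOURCE A (Python) =====
-- def in_paired_sets(pair, set1, set2, reversible=False):
--     """
--     Determine if a pair's elements fall in a pair of sets
--
--     :param pair: Tuple, containing pair of residues (triples)
--     :param set1: Set or list of residues (single-character AA codes)
--     :param set2: Set or list of residues (single-character AA codes)
--     :param reversible: Logical; can pair be in set2 x set1, as opposed to
--         set1 x set2?
--     :return: Logical value for pair's membership in the described class of AA
--         pair interactions.
--     """
--
--     pass_logical = False
--     if pair[0][-1] in set1 and pair[1][-1] in set2: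
--         pass_logical = True
--     elif reversible and (pair[1][-1] in set1 and pair[0][-1] in set2):
--         pass_logical = True
--
--     return pass_logical
--
-- def generic_dict_based_tally_reversible(pair, list_of_dictionaries, tally=None):
--     """
--     Tally matches with the pairs of categories in the list of dictionaries
--
--     :param pair: Tuple, containing pair of residues (triples).
--     :param list_of_dictionaries: list of dict describing the individual
--         categories; each dictionary corresponds to a single category and has a
--         'name' and 'set'.
--     :param tally: List, containing one element for each (reversible) AA
--         interaction name.
--     :return: Updated tally, feature_names corresponding to the AA pairs.
--     """
--
--     tally_tmp = []
--     for i, group_i in enumerate(list_of_dictionaries):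
--         for j, group_j in enumerate(list_of_dictionaries):
--             if j < i:
--                 continue
--             if in_paired_sets(pair, group_i['set'], group_j['set'],
--                               reversible=True):
--                 tally_tmp.append(1)
--             else:
--                 tally_tmp.append(0)
--
--     if tally is None:
--         tally = [0 for tally_tmp_i in tally_tmp]
--
--     tally = [tally_i + tally_tmp_i
--              for tally_i, tally_tmp_i in zip(tally, tally_tmp)]
--     return tally
-- ===== SOURCE B (Python) =====
-- def generic_dict_based_tally_reversible(pair, list_of_dictionaries, tally=None):
--     sets = [d['set'] for d in list_of_dictionaries]
--     a_in = [pair[0][-1] in s for s in sets]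
--     b_in = [pair[1][-1] in s for s in sets]
--     n = len(sets)
--     tally_tmp = [1 if (a_in[i] and b_in[j]) or (b_in[i] and a_in[j]) else 0
--                  for i in range(n) for j in range(i, n)]
--     if tally is None:
--         return tally_tmp
--     return [t + x for t, x in zip(tally, tally_tmp)]
-- ===== Notes on version B (the rewrite author's own statement) =====
-- stated objective: simpler
-- what changed: B precomputes two boolean membership tables (last residue of each pair element vs each group's set) in one pass and then emits the triangular 0/1 vector directly as a symmetric disjunction over index pairs j>=i, instead of A's doubly-nested enumerate scan that re-tests raw set membership via a helper with a reversible branch for every (i,j); the tally-None zero default collapses to returning the fresh vector itself.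
import Mathlib
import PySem

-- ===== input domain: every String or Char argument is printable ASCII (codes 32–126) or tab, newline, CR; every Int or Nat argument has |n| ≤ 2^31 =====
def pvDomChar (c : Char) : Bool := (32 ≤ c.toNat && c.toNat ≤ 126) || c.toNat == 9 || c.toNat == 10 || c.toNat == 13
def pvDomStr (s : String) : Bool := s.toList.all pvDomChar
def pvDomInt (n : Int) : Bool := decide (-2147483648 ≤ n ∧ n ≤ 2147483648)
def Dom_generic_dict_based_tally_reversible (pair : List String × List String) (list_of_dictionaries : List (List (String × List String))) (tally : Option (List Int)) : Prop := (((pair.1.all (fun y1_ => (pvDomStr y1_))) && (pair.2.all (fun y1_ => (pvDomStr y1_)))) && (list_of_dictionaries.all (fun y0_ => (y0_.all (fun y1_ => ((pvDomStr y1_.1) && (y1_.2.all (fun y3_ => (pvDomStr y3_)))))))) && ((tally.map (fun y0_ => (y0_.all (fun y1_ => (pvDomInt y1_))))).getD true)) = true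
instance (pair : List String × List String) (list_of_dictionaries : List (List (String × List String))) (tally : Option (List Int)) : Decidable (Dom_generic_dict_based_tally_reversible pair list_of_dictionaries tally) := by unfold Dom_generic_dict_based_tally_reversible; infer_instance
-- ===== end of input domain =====

-- B precomputes the two membership tables over the groups once and emits the triangular
-- vector directly, instead of re-testing set membership inside a doubly-nested scan (objective: simpler).

-- ===== PORT A =====
def in_paired_sets (pair : List String × List String) (set1 : List String) (set2 : List String) (reversible : Bool) : Bool :=
  let pass_logical := false
  if set1.contains (PySem.List.pyGetD pair.1 (-1) "") && set2.contains (PySem.List.pyGetD pair.2 (-1) "") then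
    true
  else if reversible && (set1.contains (PySem.List.pyGetD pair.2 (-1) "") && set2.contains (PySem.List.pyGetD pair.1 (-1) "")) then
    true
  else pass_logical

def generic_dict_based_tally_reversible (pair : List String × List String) (list_of_dictionaries : List (List (String × List String))) (tally : Option (List Int)) : List Int :=
  let tally_tmp : List Int :=
    (PySem.List.enumerate list_of_dictionaries).foldl (fun acc ig =>
      (PySem.List.enumerate list_of_dictionaries).foldl (fun acc2 jg =>
        if jg.1 < ig.1 then acc2
        else acc2 ++ [if in_paired_sets pair (((PySem.Dict.ofList ig.2).get? "set").getD []) (((PySem.Dict.ofList jg.2).get? "set").getD []) true then (1:Int) else 0]) acc) []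
  let tally' : List Int :=
    match tally with
    | none => tally_tmp.map (fun _ => (0:Int))
    | some t => t
  (tally'.zip tally_tmp).map (fun p => p.1 + p.2)

-- ===== PORT B =====
def generic_dict_based_tally_reversible_alt (pair : List String × List String) (list_of_dictionaries : List (List (String × List String))) (tally : Option (List Int)) : List Int :=
  let sets := list_of_dictionaries.map (fun d => ((PySem.Dict.ofList d).get? "set").getD [])
  let a_in := sets.map (fun s => s.contains (PySem.List.pyGetD pair.1 (-1) ""))
  let b_in := sets.map (fun s => s.contains (PySem.List.pyGetD pair.2 (-1) ""))
  let n : Int := (sets.length : Int)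
  let tally_tmp : List Int := (PySem.List.pyRange 0 n 1).flatMap (fun i =>
    (PySem.List.pyRange i n 1).map (fun j =>
      if (PySem.List.pyGetD a_in i false && PySem.List.pyGetD b_in j false)
         || (PySem.List.pyGetD b_in i false && PySem.List.pyGetD a_in j false) then (1:Int) else 0))
  match tally with
  | none => tally_tmp
  | some t => (t.zip tally_tmp).map (fun p => p.1 + p.2)

-- ===== PRECONDITION & SPEC =====
-- Pre_ excludes exactly the inputs where the Python A raises: an empty residue list in `pair`
-- while there is at least one group (IndexError on pair[i][-1]), or a group dict without a
-- 'set' key (KeyError).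
def Pre_generic_dict_based_tally_reversible (pair : List String × List String) (list_of_dictionaries : List (List (String × List String))) (tally : Option (List Int)) : Prop :=
  (list_of_dictionaries ≠ [] → pair.1 ≠ [] ∧ pair.2 ≠ []) ∧
  ∀ d ∈ list_of_dictionaries, "set" ∈ d.map Prod.fst

instance (pair : List String × List String) (list_of_dictionaries : List (List (String × List String))) (tally : Option (List Int)) : Decidable (Pre_generic_dict_based_tally_reversible pair list_of_dictionaries tally) := by unfold Pre_generic_dict_based_tally_reversible; infer_instance

def pvWitness_generic_dict_based_tally_reversible : (List String × List String) × (List (List (String × List String))) × Option (List Int) :=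
  ((["ALA"], ["GLY"]), [[("name", ["hydrophobic"]), ("set", ["A", "G"])]], none)

def Spec_generic_dict_based_tally_reversible (pair : List String × List String) (list_of_dictionaries : List (List (String × List String))) (tally : Option (List Int)) (out : List Int) : Prop := out = generic_dict_based_tally_reversible_alt pair list_of_dictionaries tally
instance (pair : List String × List String) (list_of_dictionaries : List (List (String × List String))) (tally : Option (List Int)) (out : List Int) : Decidable (Spec_generic_dict_based_tally_reversible pair list_of_dictionaries tally out) := by unfold Spec_generic_dict_based_tally_reversible; infer_instance

-- ===== CLAIM (what is proved, stated in full; the proofs are below) =====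
def Claim_equal_generic_dict_based_tally_reversible : Prop := ∀ (pair : List String × List String) (list_of_dictionaries : List (List (String × List String))) (tally : Option (List Int)), Dom_generic_dict_based_tally_reversible pair list_of_dictionaries tally → Pre_generic_dict_based_tally_reversible pair list_of_dictionaries tally → Spec_generic_dict_based_tally_reversible pair list_of_dictionaries tally (generic_dict_based_tally_reversible pair list_of_dictionaries tally)

-- ===== LEMMAS AND PROOFS =====

-- 'if skip then acc else acc ++ [f x]' loop shape (A's `continue` branch comes first,
-- so the library's positive-test foldl_append_ite does not apply syntactically).
lemma foldl_skip_append {α β : Type} (p : β → Prop) [DecidablePred p] (f : β → α) (l : List β) (acc : List α) :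
    l.foldl (fun acc x => if p x then acc else acc ++ [f x]) acc
      = acc ++ (l.filter (fun x => decide ¬ p x)).map f := by
  induction l generalizing acc with
  | nil => simp
  | cons y ys ih => by_cases hp : p y <;> simp [hp, ih]

-- the 'j < i: continue' scan over range 0..n keeps exactly range i..n
lemma filter_pyRange_not_lt (n i : Int) (h0 : 0 ≤ i) :
    (PySem.List.pyRange 0 n 1).filter (fun j => decide ¬ j < i)
      = PySem.List.pyRange i n 1 := by
  by_cases hin : i ≤ n
  · rw [PySem.List.pyRange_one_append 0 i n h0 hin, List.filter_append]
    have h1 : (PySem.List.pyRange 0 i 1).filter (fun j => decide ¬ j < i) = [] := by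
      apply List.filter_eq_nil_iff.mpr
      intro j hj
      have := (PySem.List.mem_pyRange_one).mp hj
      simp; omega
    have h2 : (PySem.List.pyRange i n 1).filter (fun j => decide ¬ j < i)
        = PySem.List.pyRange i n 1 := by
      apply List.filter_eq_self.mpr
      intro j hj
      have := (PySem.List.mem_pyRange_one).mp hj
      simp; omega
    rw [h1, h2]; rfl
  · have hr : PySem.List.pyRange i n 1 = [] := PySem.List.pyRange_one_eq_nil (by omega)
    rw [hr]
    apply List.filter_eq_nil_iff.mpr
    intro j hj
    have := (PySem.List.mem_pyRange_one).mp hj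
    simp; omega

-- adding a fresh zero tally is the identity
lemma zip_zeros_add (l : List Int) :
    ((l.map (fun _ => (0:Int))).zip l).map (fun p => p.1 + p.2) = l := by
  induction l with
  | nil => rfl
  | cons x xs ih => simp only [List.map_cons, List.zip_cons_cons, ih]; simp

-- index into the precomputed membership table = membership of the group fetched by index
lemma pyGetD_contains (lods : List (List (String × List String))) (x : String) (i : Int) :
    PySem.List.pyGetD (lods.map (fun d => (((PySem.Dict.ofList d).get? "set").getD []).contains x)) i false
      = (((PySem.Dict.ofList (PySem.List.pyGetD lods i [])).get? "set").getD []).contains x := by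
  exact PySem.List.pyGetD_map (fun d => (((PySem.Dict.ofList d).get? "set").getD []).contains x) lods i []

-- A's helper with reversible=True is exactly B's symmetric disjunction
lemma in_paired_sets_eq (pair : List String × List String) (s1 s2 : List String) :
    in_paired_sets pair s1 s2 true
      = ((s1.contains (PySem.List.pyGetD pair.1 (-1) "") && s2.contains (PySem.List.pyGetD pair.2 (-1) ""))
         || (s1.contains (PySem.List.pyGetD pair.2 (-1) "") && s2.contains (PySem.List.pyGetD pair.1 (-1) ""))) := by
  unfold in_paired_sets
  split_ifs with h1 h2 <;> simp_all

-- the tallied entry, as both ports compute it, as a function of the two indices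
lemma tally_tmp_eq (pair : List String × List String) (lods : List (List (String × List String))) :
    ((PySem.List.enumerate lods).foldl (fun acc ig =>
      (PySem.List.enumerate lods).foldl (fun acc2 jg =>
        if jg.1 < ig.1 then acc2
        else acc2 ++ [if in_paired_sets pair (((PySem.Dict.ofList ig.2).get? "set").getD []) (((PySem.Dict.ofList jg.2).get? "set").getD []) true then (1:Int) else 0]) acc) [])
    = (PySem.List.pyRange 0 (((lods.map (fun d => ((PySem.Dict.ofList d).get? "set").getD [])).length : Int)) 1).flatMap (fun i =>
        (PySem.List.pyRange i (((lods.map (fun d => ((PySem.Dict.ofList d).get? "set").getD [])).length : Int)) 1).map (fun j =>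
          if (PySem.List.pyGetD ((lods.map (fun d => ((PySem.Dict.ofList d).get? "set").getD [])).map (fun s => s.contains (PySem.List.pyGetD pair.1 (-1) ""))) i false
                && PySem.List.pyGetD ((lods.map (fun d => ((PySem.Dict.ofList d).get? "set").getD [])).map (fun s => s.contains (PySem.List.pyGetD pair.2 (-1) ""))) j false)
             || (PySem.List.pyGetD ((lods.map (fun d => ((PySem.Dict.ofList d).get? "set").getD [])).map (fun s => s.contains (PySem.List.pyGetD pair.2 (-1) ""))) i false
                && PySem.List.pyGetD ((lods.map (fun d => ((PySem.Dict.ofList d).get? "set").getD [])).map (fun s => s.contains (PySem.List.pyGetD pair.1 (-1) ""))) j false)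
          then (1:Int) else 0)) := by
  simp only [foldl_skip_append, PySem.List.foldl_append_eq_flatMap, List.nil_append]
  rw [PySem.List.enumerate_eq_map_pyRange lods []]
  simp only [List.flatMap_map, List.filter_map, List.map_map, List.length_map]
  apply List.flatMap_congr
  intro i hi
  obtain ⟨hi0, hin⟩ := PySem.List.mem_pyRange_one.mp hi
  have hf : ((fun (jg : Int × List (String × List String)) => decide ¬ jg.1 < i) ∘ (fun j => (j, PySem.List.pyGetD lods j []))) = (fun j => decide ¬ j < i) := rfl
  rw [hf, filter_pyRange_not_lt _ i hi0]
  have hlen : PySem.List.len lods = (lods.length : Int) := by simp [PySem.List.len_eq]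
  rw [hlen]
  apply List.map_congr_left
  intro j hj
  simp only [Function.comp_def, in_paired_sets_eq, pyGetD_contains]

-- ===== VERDICT (by name: the statement is the Claim_ definition above) =====
theorem generic_dict_based_tally_reversible_spec : Claim_equal_generic_dict_based_tally_reversible := by
  intro pair lods tally _ _
  unfold Spec_generic_dict_based_tally_reversible
  unfold generic_dict_based_tally_reversible generic_dict_based_tally_reversible_alt
  simp only []
  rw [tally_tmp_eq pair lods]
  cases tally with
  | none => exact zip_zeros_add _
  | some t => rfl
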